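-- pv_equiv track=rewrite | github.com/VetalMart/renaming | functions.py | remove_prohibited_signs
-- ===== SOURCE A (Python) =====
-- def remove_prohibited_signs(raw_list):
--     # Delete sighs which can't be use in file/folder naming.
--     raw_1 = []
--     for i in raw_list:
--         raw_1.append(
--             i.replace("/","_").
--             replace("\\","_").
--             replace("-","").
--             replace(":","_").
--             replace("*","_").
--             replace("?","_").
--             replace('"',"_").
--             replace("<","_").
--             replace(">","_").
--             replace(" ","").
--             lstrip()
--         )
--     return raw_1
-- ===== SOURCE B (Python) =====
-- def remove_prohibited_signs(raw_list):
--     # One fused character-at-a-time scan per string: classify each char and strip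
--     # leading whitespace on the fly (buffer emptiness = "still stripping" state),
--     # instead of ten staged replace passes plus a separate lstrip.
--     out = []
--     for s in raw_list:
--         buf = []
--         for c in s:
--             if c in '/\\:*?"<>':
--                 buf.append('_')
--             elif c in '- ':
--                 pass
--             elif buf or not c.isspace():
--                 buf.append(c)
--         out.append(''.join(buf))
--     return out
-- ===== Notes on version B (the rewrite author's own statement) =====
-- stated objective: alternative
-- what changed: Replaced the ten staged full-string replace passes plus a trailing lstrip by a single fused character-at-a-time state machine per string that classifies each character and performs the leading-whitespace strip on the fly (buffer emptiness encodes the strip state).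
import Mathlib
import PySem

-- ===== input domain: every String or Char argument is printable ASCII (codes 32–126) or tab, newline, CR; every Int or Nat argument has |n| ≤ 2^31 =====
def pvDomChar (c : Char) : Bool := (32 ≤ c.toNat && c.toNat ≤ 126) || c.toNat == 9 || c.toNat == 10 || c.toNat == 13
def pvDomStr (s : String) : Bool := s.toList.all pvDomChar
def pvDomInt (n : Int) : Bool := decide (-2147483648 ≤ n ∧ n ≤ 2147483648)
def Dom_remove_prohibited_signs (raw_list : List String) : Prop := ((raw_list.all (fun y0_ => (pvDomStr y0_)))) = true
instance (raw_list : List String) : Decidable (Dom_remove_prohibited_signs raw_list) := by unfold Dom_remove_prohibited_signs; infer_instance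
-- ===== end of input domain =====

-- B replaces the ten staged replace passes plus a trailing lstrip by ONE fused
-- character-at-a-time scan per string whose buffer-emptiness encodes the strip state
-- (objective: alternative; same return value).

-- ===== PORT A =====
def remove_prohibited_signs (raw_list : List String) : List String :=
  raw_list.foldl
    (fun raw_1 i =>
      raw_1 ++
        [PySem.Str.lstrip
          (PySem.Str.replace
            (PySem.Str.replace
              (PySem.Str.replace
                (PySem.Str.replace
                  (PySem.Str.replace
                    (PySem.Str.replace
                      (PySem.Str.replace
                        (PySem.Str.replace
                          (PySem.Str.replace
                            (PySem.Str.replace i "/" "_")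
                            "\\" "_")
                          "-" "")
                        ":" "_")
                      "*" "_")
                    "?" "_")
                  "\"" "_")
                "<" "_")
              ">" "_")
            " " "")])
    []

-- ===== PORT B =====
-- one step of Source B's inner loop: classify character c, append to buf or skip;
-- while buf is empty, whitespace is skipped (that is the fused lstrip)
def pvStep (buf : List Char) (c : Char) : List Char :=
  if (['/', '\\', ':', '*', '?', '"', '<', '>'] : List Char).contains c then buf ++ ['_']
  else if (['-', ' '] : List Char).contains c then buf
  else if !buf.isEmpty || !PySem.Chars.isspace c then buf ++ [c]
  else buf

def remove_prohibited_signs_alt (raw_list : List String) : List String :=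
  raw_list.foldl
    (fun out s => out ++ [String.ofList (s.toList.foldl pvStep [])])
    []

-- ===== PRECONDITION & SPEC =====
def Spec_remove_prohibited_signs (raw_list : List String) (out : List String) : Prop := out = remove_prohibited_signs_alt raw_list
instance (raw_list : List String) (out : List String) : Decidable (Spec_remove_prohibited_signs raw_list out) := by unfold Spec_remove_prohibited_signs; infer_instance

-- ===== CLAIM =====
def Claim_equal_remove_prohibited_signs : Prop := ∀ (raw_list : List String), Dom_remove_prohibited_signs raw_list → Spec_remove_prohibited_signs raw_list (remove_prohibited_signs raw_list)

-- ===== LEMMAS AND PROOFS =====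

-- the per-character substitution performed by A's chain of replaces
def pvTable (c : Char) : List Char :=
  if (['/', '\\', ':', '*', '?', '"', '<', '>'] : List Char).contains c then ['_']
  else if (['-', ' '] : List Char).contains c then []
  else [c]

-- single-char substitution function
def pvSub (a : Char) (new : List Char) (c : Char) : List Char :=
  if c = a then new else [c]

theorem pv_go_single (a : Char) (new : List Char) :
    ∀ (fuel : Nat) (l acc : List Char), l.length ≤ fuel →
      PySem.Chars.replace.go [a] new fuel l acc
        = acc.reverse ++ l.flatMap (pvSub a new) := by
  intro fuel
  induction fuel with
  | zero =>
    intro l acc h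
    have : l = [] := List.eq_nil_of_length_eq_zero (Nat.le_zero.mp h)
    subst this
    simp [PySem.Chars.replace.go]
  | succ n ih =>
    intro l acc h
    cases l with
    | nil => simp [PySem.Chars.replace.go]
    | cons c t =>
      rw [PySem.Chars.replace.go]
      by_cases hc : c = a
      · subst hc
        have hpre : List.isPrefixOf [c] (c :: t) = true := by
          simp [List.isPrefixOf]
        rw [if_pos hpre]
        simp only [List.length_cons] at h
        rw [ih _ _ (by simpa using Nat.le_of_succ_le_succ h)]
        simp [pvSub]
      · have hpre : List.isPrefixOf [a] (c :: t) = false := by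
          simp [List.isPrefixOf]
          intro hh; exact absurd hh.symm hc
        rw [if_neg (by simp [hpre])]
        simp only [List.length_cons] at h
        rw [ih _ _ (Nat.le_of_succ_le_succ h)]
        simp [pvSub, hc]

theorem pv_replace_single (s : List Char) (a : Char) (new : List Char) :
    PySem.Chars.replace s [a] new = s.flatMap (pvSub a new) := by
  rw [PySem.Chars.replace]
  simp only [List.isEmpty_cons]
  simpa using pv_go_single a new s.length s [] (le_refl _)

theorem pv_table_eq (c : Char) :
    (pvSub '/' ['_'] c).flatMap (fun c => (pvSub '\\' ['_'] c).flatMap (fun c =>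
      (pvSub '-' [] c).flatMap (fun c => (pvSub ':' ['_'] c).flatMap (fun c =>
      (pvSub '*' ['_'] c).flatMap (fun c => (pvSub '?' ['_'] c).flatMap (fun c =>
      (pvSub '"' ['_'] c).flatMap (fun c => (pvSub '<' ['_'] c).flatMap (fun c =>
      (pvSub '>' ['_'] c).flatMap (fun c => pvSub ' ' [] c)))))))))
      = pvTable c := by
  by_cases h1 : c = '/'; · subst h1; decide
  by_cases h2 : c = '\\'; · subst h2; decide
  by_cases h3 : c = '-'; · subst h3; decide
  by_cases h4 : c = ':'; · subst h4; decide
  by_cases h5 : c = '*'; · subst h5; decide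
  by_cases h6 : c = '?'; · subst h6; decide
  by_cases h7 : c = '"'; · subst h7; decide
  by_cases h8 : c = '<'; · subst h8; decide
  by_cases h9 : c = '>'; · subst h9; decide
  by_cases h10 : c = ' '; · subst h10; decide
  simp [pvSub, pvTable, h1, h2, h3, h4, h5, h6, h7, h8, h9, h10]

-- A's per-string value is the table flatMap followed by a leading-whitespace strip
theorem pv_string_eq (i : String) :
    PySem.Str.lstrip
        (PySem.Str.replace (PySem.Str.replace (PySem.Str.replace (PySem.Str.replace
          (PySem.Str.replace (PySem.Str.replace (PySem.Str.replace (PySem.Str.replace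
          (PySem.Str.replace (PySem.Str.replace i "/" "_") "\\" "_") "-" "") ":" "_")
          "*" "_") "?" "_") "\"" "_") "<" "_") ">" "_") " " "")
      = String.ofList (PySem.Chars.lstrip (i.toList.flatMap pvTable)) := by
  apply String.ext
  simp only [PySem.Str.toList_lstrip, PySem.Str.toList_replace, String.toList_ofList,
    show ("/" : String).toList = ['/'] from rfl, show ("\\" : String).toList = ['\\'] from rfl,
    show ("-" : String).toList = ['-'] from rfl, show (":" : String).toList = [':'] from rfl,
    show ("*" : String).toList = ['*'] from rfl, show ("?" : String).toList = ['?'] from rfl,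
    show ("\"" : String).toList = ['"'] from rfl, show ("<" : String).toList = ['<'] from rfl,
    show (">" : String).toList = ['>'] from rfl, show (" " : String).toList = [' '] from rfl,
    show ("_" : String).toList = ['_'] from rfl, show ("" : String).toList = [] from rfl]
  rw [pv_replace_single, pv_replace_single, pv_replace_single, pv_replace_single,
    pv_replace_single, pv_replace_single, pv_replace_single, pv_replace_single,
    pv_replace_single, pv_replace_single]
  simp only [List.flatMap_assoc]
  congr 1
  exact List.flatMap_congr (by intro c _; exact pv_table_eq c)

-- once the buffer is nonempty, each step of B appends exactly pvTable c
theorem pv_fold_nonempty :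
    ∀ (l buf : List Char), buf ≠ [] →
      l.foldl pvStep buf = buf ++ l.flatMap pvTable := by
  intro l
  induction l with
  | nil => intro buf _; simp
  | cons c t ih =>
    intro buf hbuf
    have hstep : pvStep buf c = buf ++ pvTable c := by
      unfold pvStep pvTable
      split_ifs with h1 h2 h3
      · rfl
      · simp
      · rfl
      · exfalso
        apply h3
        simp [hbuf]
    rw [List.foldl_cons, hstep]
    by_cases hn : pvTable c = []
    · rw [hn, List.append_nil, ih buf hbuf]
      simp [hn]
    · rw [ih _ (by simp [hbuf]), List.flatMap_cons, List.append_assoc]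

-- while the buffer is empty, B's fused scan IS lstrip of the table flatMap
theorem pv_fold_empty :
    ∀ (l : List Char), l.foldl pvStep [] = PySem.Chars.lstrip (l.flatMap pvTable) := by
  intro l
  induction l with
  | nil => rfl
  | cons c t ih =>
    rw [List.foldl_cons]
    by_cases h1 : (['/', '\\', ':', '*', '?', '"', '<', '>'] : List Char).contains c = true
    · have h1' : c = '/' ∨ c = '\\' ∨ c = ':' ∨ c = '*' ∨ c = '?' ∨ c = '"' ∨ c = '<' ∨ c = '>' := by
        simpa using h1
      have hstep : pvStep [] c = ['_'] := by
        rcases h1' with h|h|h|h|h|h|h|h <;> subst h <;> decide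
      have htab : pvTable c = ['_'] := by
        rcases h1' with h|h|h|h|h|h|h|h <;> subst h <;> decide
      rw [hstep, pv_fold_nonempty t ['_'] (by simp), List.flatMap_cons, htab]
      have hns : PySem.Chars.isspace '_' = false := by decide
      simp [PySem.Chars.lstrip, hns]
    · by_cases h2 : (['-', ' '] : List Char).contains c = true
      · have h2' : c = '-' ∨ c = ' ' := by simpa using h2
        have hstep : pvStep [] c = [] := by
          rcases h2' with h|h <;> subst h <;> decide
        have htab : pvTable c = [] := by
          rcases h2' with h|h <;> subst h <;> decide
        rw [hstep, ih, List.flatMap_cons, htab, List.nil_append]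
      · have htab : pvTable c = [c] := by
          unfold pvTable; rw [if_neg h1, if_neg h2]
        by_cases hsp : PySem.Chars.isspace c = true
        · have hstep : pvStep [] c = [] := by
            unfold pvStep; rw [if_neg h1, if_neg h2]; simp [hsp]
          rw [hstep, ih, List.flatMap_cons, htab]
          simp [PySem.Chars.lstrip, hsp]
        · have hsp' : PySem.Chars.isspace c = false := by
            simpa using hsp
          have hstep : pvStep [] c = [c] := by
            unfold pvStep; rw [if_neg h1, if_neg h2]; simp [hsp']
          rw [hstep, pv_fold_nonempty t [c] (by simp), List.flatMap_cons, htab]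
          simp [PySem.Chars.lstrip, hsp']

-- ===== VERDICT =====
theorem remove_prohibited_signs_spec : Claim_equal_remove_prohibited_signs := by
  intro raw_list _
  show _ = _
  unfold remove_prohibited_signs remove_prohibited_signs_alt
  rw [PySem.List.foldl_append_singleton_eq_map, PySem.List.foldl_append_singleton_eq_map]
  refine List.map_congr_left (fun i _ => ?_)
  rw [pv_string_eq, pv_fold_empty]
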